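-- pv_equiv track=rewrite | github.com/GavinPHR/adventofcode2025 | 2.py | split_intervals
-- ===== SOURCE A (Python) =====
-- def split_intervals(l, r, notest=False):
--     res = []
--     lo = l
--     r_cnt = len(str(r))
--     lo_cnt = len(str(lo))
--     while lo_cnt < r_cnt:
--         if notest or lo_cnt % 2 == 0:
--             res.append((lo, 10 ** lo_cnt - 1))
--         lo = 10 ** lo_cnt
--         lo_cnt += 1
--     if notest or r_cnt % 2 == 0:
--         res.append((lo, r))
--     return res
-- ===== SOURCE B (Python) =====
-- def split_intervals(l, r, notest=False):
--     d = len(str(l))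
--     r_cnt = len(str(r))
--     if d >= r_cnt:
--         return [(l, r)] if notest or r_cnt % 2 == 0 else []
--     rest = split_intervals(10 ** d, r, notest)
--     if notest or d % 2 == 0:
--         return [(l, 10 ** d - 1)] + rest
--     return rest
-- ===== Notes on version B (the rewrite author's own statement) =====
-- stated objective: alternative
-- what changed: Replaces A's imperative while-loop with mutable state (running lo, lo_cnt, res accumulator) by a head-building recursion on the lower bound: each call emits at most its own piece and recurses on 10**len(str(l)).
import Mathlib
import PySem

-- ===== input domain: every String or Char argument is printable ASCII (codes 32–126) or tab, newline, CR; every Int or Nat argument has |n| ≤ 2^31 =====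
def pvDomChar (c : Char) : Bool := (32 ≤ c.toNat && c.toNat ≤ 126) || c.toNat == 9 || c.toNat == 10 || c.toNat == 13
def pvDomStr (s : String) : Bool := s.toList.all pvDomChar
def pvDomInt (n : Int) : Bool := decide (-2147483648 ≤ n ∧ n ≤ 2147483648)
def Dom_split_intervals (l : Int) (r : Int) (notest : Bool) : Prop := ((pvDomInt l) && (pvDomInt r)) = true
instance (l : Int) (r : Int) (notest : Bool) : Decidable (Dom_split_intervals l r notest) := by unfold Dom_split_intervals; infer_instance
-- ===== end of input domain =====

-- B replaces A's stateful while-loop by a head-building recursion on the lower bound; objective: alternative decomposition (same cost).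

-- ===== PORT A =====
-- the while-loop of A: state (lo, lo_cnt, res); returns the final (lo, res)
def splitLoopA (notest : Bool) (r_cnt : Int) (lo : Int) (lo_cnt : Int)
    (res : List (Int × Int)) : Int × List (Int × Int) :=
  if lo_cnt < r_cnt then
    splitLoopA notest r_cnt ((10:Int) ^ lo_cnt.toNat) (lo_cnt + 1)
      (if notest || PySem.Int.mod lo_cnt 2 == 0 then res ++ [(lo, (10:Int) ^ lo_cnt.toNat - 1)] else res)
  else (lo, res)
termination_by (r_cnt - lo_cnt).toNat
decreasing_by omega

def split_intervals (l : Int) (r : Int) (notest : Bool) : List (Int × Int) :=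
  let res : List (Int × Int) := []
  let lo := l
  let r_cnt := PySem.Str.len (PySem.Int.toStr r)
  let lo_cnt := PySem.Str.len (PySem.Int.toStr lo)
  let p := splitLoopA notest r_cnt lo lo_cnt res
  if notest || PySem.Int.mod r_cnt 2 == 0 then p.2 ++ [(p.1, r)] else p.2

-- ===== PORT B =====
-- two facts the port needs for termination: str(n) is nonempty, and len(str(10**d)) = d+1
theorem toDigitsCore_len_ge (f : Nat) : ∀ (n : Nat) (l : List Char),
    l.length ≤ (Nat.toDigitsCore 10 f n l).length := by
  induction f with
  | zero => intro n l; simp [Nat.toDigitsCore]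
  | succ f ih =>
    intro n l
    simp only [Nat.toDigitsCore]
    split
    · simp
    · exact le_trans (by simp) (ih _ _)

theorem len_toStr_ge_one (n : Int) : 1 ≤ PySem.Str.len (PySem.Int.toStr n) := by
  rw [PySem.Str.len_eq, PySem.Int.toList_toStr]
  have h : 1 ≤ (PySem.Int.toChars n).length := by
    unfold PySem.Int.toChars
    split
    · simp
    · simp only [Nat.toDigits, Nat.toDigitsCore]
      split
      · simp
      · exact le_trans (by simp) (toDigitsCore_len_ge _ _ _)
  exact_mod_cast h

theorem toDigitsCore_pow (d : Nat) : ∀ (f : Nat) (l : List Char), d < f →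
    Nat.toDigitsCore 10 f (10 ^ d) l = '1' :: List.replicate d '0' ++ l := by
  induction d with
  | zero =>
    intro f l hf
    obtain ⟨f', rfl⟩ : ∃ f', f = f' + 1 := ⟨f - 1, by omega⟩
    simp [Nat.toDigitsCore, Nat.digitChar]
  | succ d ih =>
    intro f l hf
    obtain ⟨f', rfl⟩ : ∃ f', f = f' + 1 := ⟨f - 1, by omega⟩
    have h10 : 10 ^ (d + 1) % 10 = 0 := by
      simp [pow_succ, Nat.mul_mod_left]
    have hdiv : 10 ^ (d + 1) / 10 = 10 ^ d := by
      rw [pow_succ]; exact Nat.mul_div_cancel _ (by norm_num)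
    simp only [Nat.toDigitsCore, h10, hdiv]
    rw [if_neg (by positivity)]
    rw [ih f' _ (by omega)]
    simp [List.replicate_succ', Nat.digitChar]

theorem len_toStr_pow (d : Nat) :
    PySem.Str.len (PySem.Int.toStr ((10:Int) ^ d)) = (d : Int) + 1 := by
  have hcast : ((10:Int) ^ d) = ((10 ^ d : Nat) : Int) := by push_cast; ring
  rw [PySem.Str.len_eq, PySem.Int.toList_toStr, hcast]
  unfold PySem.Int.toChars
  rw [if_neg (Int.not_lt.mpr (Int.natCast_nonneg _))]
  simp only [Int.toNat_natCast, Nat.toDigits]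
  rw [toDigitsCore_pow d (10 ^ d + 1) [] (by have : d < 10 ^ d := Nat.lt_pow_self (by norm_num); omega)]
  simp

def split_intervals_alt (l : Int) (r : Int) (notest : Bool) : List (Int × Int) :=
  if PySem.Str.len (PySem.Int.toStr l) ≥ PySem.Str.len (PySem.Int.toStr r) then
    if notest || PySem.Int.mod (PySem.Str.len (PySem.Int.toStr r)) 2 == 0 then [(l, r)] else []
  else
    let rest := split_intervals_alt ((10:Int) ^ (PySem.Str.len (PySem.Int.toStr l)).toNat) r notest
    if notest || PySem.Int.mod (PySem.Str.len (PySem.Int.toStr l)) 2 == 0 then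
      (l, (10:Int) ^ (PySem.Str.len (PySem.Int.toStr l)).toNat - 1) :: rest
    else rest
termination_by (PySem.Str.len (PySem.Int.toStr r) - PySem.Str.len (PySem.Int.toStr l)).toNat
decreasing_by
  have h1 := len_toStr_ge_one l
  have h2 := len_toStr_pow (PySem.Str.len (PySem.Int.toStr l)).toNat
  omega

-- ===== PRECONDITION & SPEC =====
def Spec_split_intervals (l : Int) (r : Int) (notest : Bool) (out : List (Int × Int)) : Prop := out = split_intervals_alt l r notest
instance (l : Int) (r : Int) (notest : Bool) (out : List (Int × Int)) : Decidable (Spec_split_intervals l r notest out) := by unfold Spec_split_intervals; infer_instance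

-- ===== CLAIM =====
def Claim_equal_split_intervals : Prop := ∀ (l : Int) (r : Int) (notest : Bool), Dom_split_intervals l r notest → Spec_split_intervals l r notest (split_intervals l r notest)

-- ===== LEMMAS AND PROOFS =====
-- the loop's accumulator is a prefix: running from res equals res ++ the run from []
theorem splitLoopA_acc (notest : Bool) (r_cnt : Int) :
    ∀ (n : Nat) (lo c : Int) (res : List (Int × Int)), (r_cnt - c).toNat = n →
    splitLoopA notest r_cnt lo c res
      = ((splitLoopA notest r_cnt lo c []).1, res ++ (splitLoopA notest r_cnt lo c []).2) := by
  intro n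
  induction n with
  | zero =>
    intro lo c res h
    rw [splitLoopA, if_neg (show ¬ c < r_cnt by omega)]
    rw [splitLoopA, if_neg (show ¬ c < r_cnt by omega)]
    simp
  | succ n ih =>
    intro lo c res h
    have hc : c < r_cnt := by omega
    rw [splitLoopA, if_pos hc]
    conv_rhs => rw [splitLoopA, if_pos hc]
    cases hb : (notest || PySem.Int.mod c 2 == 0) with
    | false =>
      simp only [Bool.false_eq_true, if_false]
      rw [ih _ (c+1) res (by omega)]
    | true =>
      simp only [if_true, List.nil_append]
      rw [ih _ (c+1) (res ++ [(lo, (10:Int) ^ c.toNat - 1)]) (by omega),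
          ih _ (c+1) ([(lo, (10:Int) ^ c.toNat - 1)]) (by omega)]
      simp

theorem main_eq (notest : Bool) (r : Int) :
    ∀ (n : Nat) (lo : Int),
    (PySem.Str.len (PySem.Int.toStr r) - PySem.Str.len (PySem.Int.toStr lo)).toNat = n →
    split_intervals lo r notest = split_intervals_alt lo r notest := by
  intro n
  induction n with
  | zero =>
    intro lo h
    rw [split_intervals, split_intervals_alt,
        if_pos (show PySem.Str.len (PySem.Int.toStr lo) ≥ PySem.Str.len (PySem.Int.toStr r) by omega)]
    rw [splitLoopA, if_neg (show ¬ PySem.Str.len (PySem.Int.toStr lo) < PySem.Str.len (PySem.Int.toStr r) by omega)]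
    cases (notest || PySem.Int.mod (PySem.Str.len (PySem.Int.toStr r)) 2 == 0) <;> simp
  | succ n ih =>
    intro lo h
    have hd1 := len_toStr_ge_one lo
    have hlt : PySem.Str.len (PySem.Int.toStr lo) < PySem.Str.len (PySem.Int.toStr r) := by omega
    have hpow := len_toStr_pow (PySem.Str.len (PySem.Int.toStr lo)).toNat
    have hcnt : PySem.Str.len (PySem.Int.toStr ((10:Int) ^ (PySem.Str.len (PySem.Int.toStr lo)).toNat))
        = PySem.Str.len (PySem.Int.toStr lo) + 1 := by omega
    have hih := ih ((10:Int) ^ (PySem.Str.len (PySem.Int.toStr lo)).toNat) (by omega)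
    rw [split_intervals, hcnt] at hih
    rw [split_intervals, split_intervals_alt,
        if_neg (show ¬ PySem.Str.len (PySem.Int.toStr lo) ≥ PySem.Str.len (PySem.Int.toStr r) by omega)]
    rw [splitLoopA, if_pos hlt]
    rw [splitLoopA_acc notest (PySem.Str.len (PySem.Int.toStr r))
        ((PySem.Str.len (PySem.Int.toStr r) - (PySem.Str.len (PySem.Int.toStr lo) + 1)).toNat)
        ((10:Int) ^ (PySem.Str.len (PySem.Int.toStr lo)).toNat)
        (PySem.Str.len (PySem.Int.toStr lo) + 1) _ rfl]
    cases hb : (notest || PySem.Int.mod (PySem.Str.len (PySem.Int.toStr lo)) 2 == 0) <;>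
      cases hr : (notest || PySem.Int.mod (PySem.Str.len (PySem.Int.toStr r)) 2 == 0) <;>
      simp only [hr, Bool.false_eq_true, if_true, if_false, List.nil_append] at hih ⊢ <;>
      rw [← hih] <;> simp

-- ===== VERDICT =====
theorem split_intervals_spec : Claim_equal_split_intervals := by
  intro l r notest _
  show split_intervals l r notest = split_intervals_alt l r notest
  exact main_eq notest r _ l rfl
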